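-- pv_equiv track=rewrite | github.com/lukaszlukaszew/kattis-solutions | N/nimionese.py | ending
-- ===== SOURCE A (Python) =====
-- consonants = "bcdgknpt"
--
-- def ending(letter):
--     """Prepare proper ending of the word"""
--     first_ending_letter = "aou"
--     if letter.lower() in consonants:
--         possibilities = []
--         for fel in first_ending_letter:
--             possibilities.append((abs(ord(letter) - ord(fel)), abs(ord(fel) - ord("A")), fel + "h"))
--
--         possibilities.sort()
--         full_ending = possibilities[0][2]
--
--     else:
--         full_ending = ""
--
--     return full_ending
-- ===== SOURCE B (Python) =====
-- consonants = "bcdgknpt"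
--
-- def ending(letter):
--     """Prepare proper ending of the word"""
--     if letter.lower() not in consonants:
--         return ""
--     x = ord(letter)
--     # Closed form: the vowels are a=97, o=111, u=117. The nearest-vowel choice
--     # (ties going to the vowel closer to 'A') is a pure threshold on the code:
--     # up to the a/o midpoint 104 -> 'a'; up to the o/u midpoint 114 -> 'o'; else 'u'.
--     if x <= 104:
--         return "ah"
--     if x <= 114:
--         return "oh"
--     return "uh"
-- ===== Notes on version B (the rewrite author's own statement) =====
-- stated objective: simpler
-- what changed: Replaces building the (distance, tiebreak, suffix) tuple list, sorting it and taking the first element with a closed-form threshold chain on the character code: the nearest-vowel-with-tiebreak choice is provably 'a' for codes <= 104, 'o' for codes <= 114, 'u' otherwise.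
import Mathlib
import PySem

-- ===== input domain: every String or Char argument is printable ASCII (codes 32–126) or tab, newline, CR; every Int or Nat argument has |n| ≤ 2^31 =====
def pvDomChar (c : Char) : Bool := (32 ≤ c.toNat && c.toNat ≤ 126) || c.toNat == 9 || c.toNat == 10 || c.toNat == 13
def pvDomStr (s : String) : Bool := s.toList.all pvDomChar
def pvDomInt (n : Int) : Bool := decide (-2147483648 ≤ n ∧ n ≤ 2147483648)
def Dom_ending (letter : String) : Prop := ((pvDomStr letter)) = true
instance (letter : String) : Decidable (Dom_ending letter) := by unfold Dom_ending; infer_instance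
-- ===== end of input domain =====

-- B replaces A's build-list/sort/take-first minimization with a closed-form threshold
-- test on the character code (objective: simpler).

-- ===== PORT A =====
-- Python tuple '<' on (int, int, str), hand-ported (Mathlib's product order is pointwise, not lexicographic)
def pvLexBefore (a b : Int × Int × String) : Bool :=
  a.1 < b.1 || (a.1 == b.1 && (a.2.1 < b.2.1 || (a.2.1 == b.2.1 && decide (a.2.2 < b.2.2))))

-- the consonant branch of A, with x = ord(letter)
def pvConsBranchA (x : Int) : String :=
  let possibilities := ("aou".toList).foldl
    (fun acc fel => acc ++ [(|x - (fel.toNat : Int)|, |(fel.toNat : Int) - 65|, String.ofList [fel] ++ "h")]) []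
  -- possibilities.sort(): stable insertion sort on Python tuple order (PySem's sorted-as-foldl-insertBy shape)
  let sortedP := possibilities.foldl (fun acc p => PySem.List.insertBy pvLexBefore p acc) []
  match sortedP with
  | p :: _ => p.2.2
  | [] => ""   -- unreachable: possibilities always has 3 elements

def ending (letter : String) : String :=
  if PySem.Str.isIn (PySem.Str.lower letter) "bcdgknpt" then
    match letter.toList with
    | [c] => pvConsBranchA (c.toNat : Int)
    | _ => ""   -- Python raises TypeError here (ord of a non-single-char string); outside Pre_
  else ""

-- ===== PORT B =====
-- ord(s) : some code point for a one-char string, none = Python's TypeError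
def pvOrd? (s : String) : Option Int :=
  match s.toList with
  | c :: rest => if rest.isEmpty then some (c.toNat : Int) else none
  | [] => none

def ending_alt (letter : String) : String :=
  if PySem.Str.isIn (PySem.Str.lower letter) "bcdgknpt" then
    match pvOrd? letter with
    | some x =>
      if x ≤ 104 then "ah"
      else if x ≤ 114 then "oh"
      else "uh"
    | none => ""   -- Python raises TypeError here; outside Pre_
  else ""

-- ===== PRECONDITION & SPEC =====
-- Pre_ excludes exactly the inputs where A raises TypeError: letter.lower() a substring of the
-- consonants but letter not a single character, so ord(letter) raises (B raises there too).
def Pre_ending (letter : String) : Prop :=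
  PySem.Str.isIn (PySem.Str.lower letter) "bcdgknpt" = true → letter.length = 1
instance (letter : String) : Decidable (Pre_ending letter) := by unfold Pre_ending; infer_instance
def pvWitness_ending : String := "b"

def Spec_ending (letter : String) (out : String) : Prop := out = ending_alt letter
instance (letter : String) (out : String) : Decidable (Spec_ending letter out) := by unfold Spec_ending; infer_instance

-- ===== CLAIM (what is proved, stated in full; the proofs are below) =====
def Claim_equal_ending : Prop := ∀ (letter : String), Dom_ending letter → Pre_ending letter → Spec_ending letter (ending letter)

-- ===== LEMMAS AND PROOFS =====
lemma branch_eq (x : Int) :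
    pvConsBranchA x = (if x ≤ 104 then "ah" else if x ≤ 114 then "oh" else "uh") := by
  simp only [pvConsBranchA, show "aou".toList = ['a', 'o', 'u'] from rfl,
    List.foldl_cons, List.foldl_nil, List.nil_append, List.cons_append]
  simp only [PySem.List.insertBy, pvLexBefore]
  split_ifs <;> simp_all [PySem.List.insertBy, pvLexBefore, Int.abs_eq_natAbs, -Nat.cast_natAbs] <;>
    first | rfl | omega | (split_ifs <;> simp_all <;> omega)

-- ===== VERDICT (by name: the statement is the Claim_ definition above) =====
theorem ending_spec : Claim_equal_ending := by
  intro letter _ hpre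
  unfold Spec_ending ending ending_alt
  by_cases h : PySem.Str.isIn (PySem.Str.lower letter) "bcdgknpt" = true
  · have hlen := hpre h
    have hl : letter.toList.length = 1 := hlen
    obtain ⟨c, hc⟩ := List.length_eq_one_iff.mp hl
    rw [if_pos h, if_pos h, hc]
    simp only [pvOrd?, hc, List.isEmpty_nil, if_true]
    exact branch_eq _
  · rw [if_neg h, if_neg h]
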